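-- pv_equiv track=rewrite | github.com/eole-nlp/eole | recipes/hunyuan/eole-translator.py | rebuild_text
-- ===== SOURCE A (Python) =====
-- def rebuild_text(translated_sentences, breaks):
--     result = []
--     s_idx = 0
--     b_idx = 0
--
--     # Alternate between sentence and break in the original order
--     # starting with a sentence if the original text did
--     while s_idx < len(translated_sentences) or b_idx < len(breaks):
--         if s_idx < len(translated_sentences):
--             result.append(translated_sentences[s_idx])
--             s_idx += 1
--         if b_idx < len(breaks):
--             result.append(breaks[b_idx])
--             b_idx += 1
--
--     return "".join(result)
-- ===== SOURCE B (Python) =====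
-- def rebuild_text(translated_sentences, breaks):
--     k = min(len(translated_sentences), len(breaks))
--     head = "".join(s + b for s, b in zip(translated_sentences, breaks))
--     return head + "".join(translated_sentences[k:]) + "".join(breaks[k:])
-- ===== Notes on version B (the rewrite author's own statement) =====
-- stated objective: alternative
-- what changed: Instead of interleaving element-by-element with two cursors, B splits the task into a paired prefix (zip, concatenating each sentence with its break) and the leftover suffix of whichever list is longer, appended as a block; correct because at most one leftover is non-empty.
import Mathlib
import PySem

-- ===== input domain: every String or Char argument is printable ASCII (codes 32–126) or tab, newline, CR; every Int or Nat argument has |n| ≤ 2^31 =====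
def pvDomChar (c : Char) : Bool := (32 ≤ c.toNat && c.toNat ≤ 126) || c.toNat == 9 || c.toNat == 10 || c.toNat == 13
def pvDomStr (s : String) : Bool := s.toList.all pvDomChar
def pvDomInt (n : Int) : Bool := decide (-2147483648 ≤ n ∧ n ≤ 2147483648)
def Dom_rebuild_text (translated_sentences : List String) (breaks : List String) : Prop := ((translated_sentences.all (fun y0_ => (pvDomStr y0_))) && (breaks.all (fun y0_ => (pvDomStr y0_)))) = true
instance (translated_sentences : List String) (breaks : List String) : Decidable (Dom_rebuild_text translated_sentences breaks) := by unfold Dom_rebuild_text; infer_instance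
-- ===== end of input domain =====

-- ===== PORT A =====
-- B rebuilds the text as (paired zip prefix) ++ (leftover suffix of the longer list) instead of A's
-- dual-cursor interleaving loop (alternative decomposition, same cost).
-- A's loop: while either index in range, append sentence (if any) then break (if any).
def rebuildLoopA : List String → List String → List String
  | [], [] => []
  | s :: ss, [] => s :: rebuildLoopA ss []
  | [], b :: bs => b :: rebuildLoopA [] bs
  | s :: ss, b :: bs => s :: b :: rebuildLoopA ss bs

def rebuild_text (translated_sentences : List String) (breaks : List String) : String :=
  PySem.Str.join "" (rebuildLoopA translated_sentences breaks)

-- ===== PORT B =====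
-- k = min(len ts, len bs); "".join(s+b for zip) + "".join(ts[k:]) + "".join(bs[k:])
def rebuild_text_alt (translated_sentences : List String) (breaks : List String) : String :=
  PySem.Str.join "" ((translated_sentences.zip breaks).map (fun p => p.1 ++ p.2))
    ++ PySem.Str.join "" (PySem.List.slice translated_sentences
        (some (min (translated_sentences.length : Int) (breaks.length : Int))) none)
    ++ PySem.Str.join "" (PySem.List.slice breaks
        (some (min (translated_sentences.length : Int) (breaks.length : Int))) none)

-- ===== PRECONDITION & SPEC =====
def Spec_rebuild_text (translated_sentences : List String) (breaks : List String) (out : String) : Prop := out = rebuild_text_alt translated_sentences breaks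
instance (translated_sentences : List String) (breaks : List String) (out : String) : Decidable (Spec_rebuild_text translated_sentences breaks out) := by unfold Spec_rebuild_text; infer_instance

-- ===== CLAIM =====
def Claim_equal_rebuild_text : Prop := ∀ (translated_sentences : List String) (breaks : List String), Dom_rebuild_text translated_sentences breaks → Spec_rebuild_text translated_sentences breaks (rebuild_text translated_sentences breaks)

-- ===== LEMMAS AND PROOFS =====
lemma join_empty (l : List String) :
    PySem.Str.join "" l = String.ofList ((l.map String.toList).flatten) := by
  simp only [PySem.Str.join, PySem.Chars.join, List.intercalate]
  congr 1
  induction l with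
  | nil => simp
  | cons x xs ih =>
    cases xs with
    | nil => simp
    | cons y ys => simpa using ih

lemma flatten_eq (ts bs : List String) :
    ((rebuildLoopA ts bs).map String.toList).flatten
      = (((ts.zip bs).map (fun p => p.1 ++ p.2)).map String.toList).flatten
        ++ ((ts.drop (min ts.length bs.length)).map String.toList).flatten
        ++ ((bs.drop (min ts.length bs.length)).map String.toList).flatten := by
  induction ts generalizing bs with
  | nil =>
    induction bs with
    | nil => simp [rebuildLoopA]
    | cons b bs ih => simp [rebuildLoopA, ih]
  | cons s ss ih =>
    cases bs with
    | nil =>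
      have := ih []
      simp_all [rebuildLoopA]
    | cons b bs =>
      simp [rebuildLoopA, ih bs]

-- ===== VERDICT =====
theorem rebuild_text_spec : Claim_equal_rebuild_text := by
  intro ts bs _
  unfold Spec_rebuild_text rebuild_text rebuild_text_alt
  have hk : (0:Int) ≤ min (ts.length : Int) (bs.length : Int) := by positivity
  rw [PySem.List.slice_from ts hk, PySem.List.slice_from bs hk]
  have htoNat : (min (ts.length : Int) (bs.length : Int)).toNat = min ts.length bs.length := by
    omega
  rw [htoNat, join_empty, join_empty, join_empty, join_empty, flatten_eq]
  apply String.toList_injective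
  simp [List.map_drop]
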